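-- pv_equiv track=rewrite | github.com/inchei/bangumi-wiki-scripts | filter_by_fields.py | check_meta_tag_conditions
-- ===== SOURCE A (Python) =====
-- def check_meta_tag_conditions(data, meta_tag_filters):
--     """检查元标签条件"""
--     if not meta_tag_filters:
--         return True
--
--     meta_tags = data.get('meta_tags', [])
--
--     for tag_name, negate in meta_tag_filters:
--         tag_exists = tag_name in meta_tags
--         if (negate and tag_exists) or (not negate and not tag_exists):
--             return False
--
--     return True
-- ===== SOURCE B (Python) =====
-- def check_meta_tag_conditions(data, meta_tag_filters):
--     """检查元标签条件"""
--     tags = set(data.get('meta_tags', []))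
--     required = {t for t, neg in meta_tag_filters if not neg}
--     forbidden = {t for t, neg in meta_tag_filters if neg}
--     return required <= tags and forbidden.isdisjoint(tags)
-- ===== Notes on version B (the rewrite author's own statement) =====
-- stated objective: simpler
-- what changed: Replaced the per-filter membership loop with early return by building required/forbidden tag sets once and answering with set algebra (subset and disjointness).
import Mathlib
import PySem

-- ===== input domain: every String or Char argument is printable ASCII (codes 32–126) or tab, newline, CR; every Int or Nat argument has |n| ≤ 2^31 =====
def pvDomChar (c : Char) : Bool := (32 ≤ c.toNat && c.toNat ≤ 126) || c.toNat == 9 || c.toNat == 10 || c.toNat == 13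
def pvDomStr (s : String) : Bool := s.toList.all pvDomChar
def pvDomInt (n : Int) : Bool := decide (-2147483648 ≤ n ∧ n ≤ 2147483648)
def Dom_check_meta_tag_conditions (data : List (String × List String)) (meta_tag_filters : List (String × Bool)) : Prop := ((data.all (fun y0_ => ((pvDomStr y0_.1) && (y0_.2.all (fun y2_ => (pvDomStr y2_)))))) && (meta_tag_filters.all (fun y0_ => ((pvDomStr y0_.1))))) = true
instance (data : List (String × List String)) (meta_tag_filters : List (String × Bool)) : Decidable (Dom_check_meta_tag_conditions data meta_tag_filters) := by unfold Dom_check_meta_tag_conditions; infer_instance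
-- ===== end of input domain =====

-- B replaces A's per-filter membership loop with two index sets built once and set algebra (simpler).

-- ===== PORT A =====
-- the for-loop with early `return False`, step for step
def checkLoopA (meta_tags : List String) : List (String × Bool) → Bool
  | [] => true
  | (tag_name, negate) :: rest =>
    let tag_exists := meta_tags.contains tag_name
    if (negate && tag_exists) || (!negate && !tag_exists) then false
    else checkLoopA meta_tags rest

def check_meta_tag_conditions (data : List (String × List String)) (meta_tag_filters : List (String × Bool)) : Bool :=
  if meta_tag_filters.isEmpty then true
  else
    let meta_tags := (PySem.Dict.mk data).getD "meta_tags" []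
    checkLoopA meta_tags meta_tag_filters

-- ===== PORT B =====
def check_meta_tag_conditions_alt (data : List (String × List String)) (meta_tag_filters : List (String × Bool)) : Bool :=
  let tags : PySem.Set String := PySem.Set.ofList ((PySem.Dict.mk data).getD "meta_tags" [])
  let required : PySem.Set String := PySem.Set.ofList ((meta_tag_filters.filter (fun p => !p.2)).map Prod.fst)
  let forbidden : PySem.Set String := PySem.Set.ofList ((meta_tag_filters.filter (fun p => p.2)).map Prod.fst)
  PySem.Set.issubset required tags && PySem.Set.isdisjoint forbidden tags

-- ===== PRECONDITION & SPEC =====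
def Spec_check_meta_tag_conditions (data : List (String × List String)) (meta_tag_filters : List (String × Bool)) (out : Bool) : Prop := out = check_meta_tag_conditions_alt data meta_tag_filters
instance (data : List (String × List String)) (meta_tag_filters : List (String × Bool)) (out : Bool) : Decidable (Spec_check_meta_tag_conditions data meta_tag_filters out) := by unfold Spec_check_meta_tag_conditions; infer_instance

-- ===== CLAIM (what is proved, stated in full; the proofs are below) =====
def Claim_equal_check_meta_tag_conditions : Prop := ∀ (data : List (String × List String)) (meta_tag_filters : List (String × Bool)), Dom_check_meta_tag_conditions data meta_tag_filters → Spec_check_meta_tag_conditions data meta_tag_filters (check_meta_tag_conditions data meta_tag_filters)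

-- ===== LEMMAS AND PROOFS =====

-- A's loop returns true iff every filter-condition holds
theorem checkLoopA_eq_true_iff (meta_tags : List String) (mf : List (String × Bool)) :
    checkLoopA meta_tags mf = true ↔
      ∀ p ∈ mf, (p.2 = true → p.1 ∉ meta_tags) ∧ (p.2 = false → p.1 ∈ meta_tags) := by
  induction mf with
  | nil => simp [checkLoopA]
  | cons hd tl ih =>
    obtain ⟨t, neg⟩ := hd
    simp only [checkLoopA]
    cases neg <;> by_cases hmem : t ∈ meta_tags <;>
      simp [hmem, ih]

-- B returns true iff every filter-condition holds
theorem alt_eq_true_iff (data : List (String × List String)) (mf : List (String × Bool)) :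
    check_meta_tag_conditions_alt data mf = true ↔
      ∀ p ∈ mf, (p.2 = true → p.1 ∉ (PySem.Dict.mk data).getD "meta_tags" []) ∧
                (p.2 = false → p.1 ∈ (PySem.Dict.mk data).getD "meta_tags" []) := by
  simp only [check_meta_tag_conditions_alt, Bool.and_eq_true,
    PySem.Set.issubset_iff, PySem.Set.isdisjoint_iff]
  constructor
  · rintro ⟨hr, hf⟩ ⟨t, neg⟩ hmem
    cases neg
    · refine ⟨by simp, fun _ => ?_⟩
      have : t ∈ PySem.Set.ofList (((mf.filter (fun p => !p.2)).map Prod.fst)) := by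
        simp only [PySem.Set.mem_ofList, List.mem_map, List.mem_filter]
        exact ⟨(t, false), ⟨hmem, rfl⟩, rfl⟩
      simpa [PySem.Set.mem_ofList] using hr t this
    · refine ⟨fun _ => ?_, by simp⟩
      have : t ∈ PySem.Set.ofList (((mf.filter (fun p => p.2)).map Prod.fst)) := by
        simp only [PySem.Set.mem_ofList, List.mem_map, List.mem_filter]
        exact ⟨(t, true), ⟨hmem, rfl⟩, rfl⟩
      intro htags
      exact hf t this (by simpa [PySem.Set.mem_ofList] using htags)
  · intro h
    constructor
    · intro t ht
      simp only [PySem.Set.mem_ofList, List.mem_map, List.mem_filter] at ht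
      obtain ⟨⟨t', neg⟩, ⟨hm, hneg⟩, rfl⟩ := ht
      have := (h _ hm).2
      simp at hneg
      simpa [PySem.Set.mem_ofList] using this (by simpa using hneg)
    · intro t ht htags
      simp only [PySem.Set.mem_ofList, List.mem_map, List.mem_filter] at ht
      obtain ⟨⟨t', neg⟩, ⟨hm, hneg⟩, rfl⟩ := ht
      exact (h _ hm).1 hneg (by simpa [PySem.Set.mem_ofList] using htags)

-- ===== VERDICT (by name: the statement is the Claim_ definition above) =====
theorem check_meta_tag_conditions_spec : Claim_equal_check_meta_tag_conditions := by
  intro data mf _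
  unfold Spec_check_meta_tag_conditions
  rw [Bool.eq_iff_iff]
  unfold check_meta_tag_conditions
  by_cases hnil : mf.isEmpty
  · simp only [hnil, if_true]
    rw [alt_eq_true_iff]
    simp [List.isEmpty_iff.mp hnil]
  · simp only [hnil, Bool.false_eq_true, if_false]
    rw [checkLoopA_eq_true_iff, alt_eq_true_iff]
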